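-- pv_equiv track=rewrite | github.com/XipingGong/pfas_docking | scripts/reorder_pdb_by_atom_info.py | build_residue_renumbering_map
-- ===== SOURCE A (Python) =====
-- def build_residue_renumbering_map(pdb_lines):
--     """Assign a relative index to each unique residue based on its appearance."""
--     seen = {}
--     res_map = {}
--     index = 0
--     for line in pdb_lines:
--         if line.startswith(("ATOM", "HETATM")):
--             res_name = line[17:20].strip()
--             chain_id = line[21].strip()
--             res_seq = line[22:26].strip()
--             key = (res_name, chain_id, res_seq)
--             if key not in seen:
--                 seen[key] = index
--                 index += 1
--             res_map[key] = seen[key]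
--     return res_map
-- ===== SOURCE B (Python) =====
-- def build_residue_renumbering_map(pdb_lines):
--     """Assign a relative index to each unique residue based on its appearance."""
--     # Scan BACKWARDS with unconditional overwrite: the final value stored for a
--     # key is the position of its FIRST occurrence (no membership test needed).
--     first = {}
--     for pos in range(len(pdb_lines) - 1, -1, -1):
--         line = pdb_lines[pos]
--         if line.startswith(("ATOM", "HETATM")):
--             first[(line[17:20].strip(), line[21].strip(), line[22:26].strip())] = pos
--     # Rank the keys by first-occurrence position.
--     return {key: rank for rank, key in enumerate(sorted(first, key=first.get))}
-- ===== Notes on version B (the rewrite author's own statement) =====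
-- stated objective: alternative
-- what changed: Instead of A's forward pass with a membership test and a running counter, B scans the lines backwards overwriting first[key]=pos unconditionally (so the surviving value is the first-occurrence position), then sorts the keys by that position and enumerates the sorted order.
import Mathlib
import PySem

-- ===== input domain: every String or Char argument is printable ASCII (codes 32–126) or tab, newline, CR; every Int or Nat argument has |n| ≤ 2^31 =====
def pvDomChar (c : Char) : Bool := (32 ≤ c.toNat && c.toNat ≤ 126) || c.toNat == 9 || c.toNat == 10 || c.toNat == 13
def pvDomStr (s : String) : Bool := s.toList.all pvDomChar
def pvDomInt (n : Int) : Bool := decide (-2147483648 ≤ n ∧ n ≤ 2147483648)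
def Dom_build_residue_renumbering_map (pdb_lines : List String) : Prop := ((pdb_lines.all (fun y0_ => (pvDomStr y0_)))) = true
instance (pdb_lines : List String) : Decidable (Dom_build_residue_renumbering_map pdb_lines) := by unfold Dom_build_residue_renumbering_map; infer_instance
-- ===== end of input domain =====

-- B replaces A's forward pass (membership test + running counter) by a BACKWARD scan that
-- overwrites first[key] = pos unconditionally (the surviving value is the first-occurrence
-- position) and then sorts the keys by that position (objective: alternative algorithm).

-- ===== PORT A =====
-- A's loop body as a named step function; the state is (seen, res_map, index).
def pvStepA (st : PySem.Dict (String × String × String) Int × PySem.Dict (String × String × String) Int × Int)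
    (line : String) :
    PySem.Dict (String × String × String) Int × PySem.Dict (String × String × String) Int × Int :=
  let seen := st.1
  let res_map := st.2.1
  let index := st.2.2
  if PySem.Str.startswith line "ATOM" || PySem.Str.startswith line "HETATM" then
    let res_name := PySem.Str.strip (PySem.Str.slice line (some 17) (some 20))
    -- line[21]: Python raises IndexError when the line is shorter; those inputs are excluded by Pre_ (the ' ' default is never hit there)
    let chain_id := PySem.Str.strip (String.ofList [((PySem.Str.pyGet? line 21).getD ' ')])
    let res_seq := PySem.Str.strip (PySem.Str.slice line (some 22) (some 26))
    let key := (res_name, chain_id, res_seq)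
    let p := if seen.contains key then (seen, index) else (seen.insert key index, index + 1)
    let seen := p.1
    let index := p.2
    let res_map := res_map.insert key ((seen.get? key).getD 0)
    (seen, res_map, index)
  else
    (seen, res_map, index)

def build_residue_renumbering_map (pdb_lines : List String) : List (String × String × String × Int) :=
  let st := pdb_lines.foldl pvStepA (PySem.Dict.empty, PySem.Dict.empty, (0 : Int))
  st.2.1.items.map (fun p => (p.1.1, p.1.2.1, p.1.2.2, p.2))

-- ===== PORT B =====
def pvIsAtomB (line : String) : Bool :=
  PySem.Str.startswith line "ATOM" || PySem.Str.startswith line "HETATM"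

def pvKeyB (line : String) : String × String × String :=
  (PySem.Str.strip (PySem.Str.slice line (some 17) (some 20)),
   PySem.Str.strip (String.ofList [((PySem.Str.pyGet? line 21).getD ' ')]),
   PySem.Str.strip (PySem.Str.slice line (some 22) (some 26)))

def build_residue_renumbering_map_alt (pdb_lines : List String) : List (String × String × String × Int) :=
  -- for pos in range(len(pdb_lines) - 1, -1, -1): first[key(line)] = pos  (unconditional overwrite)
  let first := (PySem.List.pyRange (PySem.List.len pdb_lines - 1) (-1) (-1)).foldl
      (fun d pos =>
        -- pdb_lines[pos]: pos is always in range here, the default "" is never hit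
        let line := PySem.List.pyGetD pdb_lines pos ""
        if pvIsAtomB line then d.insert (pvKeyB line) pos else d)
      PySem.Dict.empty
  -- sorted(first, key=first.get): every key is present, so .get never yields None (getD 0 unreached)
  let ordered := PySem.List.sorted first.keys (fun k => (first.get? k).getD 0) false
  (PySem.List.enumerate ordered 0).map (fun p => (p.2.1, p.2.2.1, p.2.2.2, p.1))

-- ===== PRECONDITION & SPEC =====
-- Pre_ excludes exactly the inputs on which Python A raises IndexError at line[21]:
-- an ATOM/HETATM line shorter than 22 characters (B raises there too).
def Pre_build_residue_renumbering_map (pdb_lines : List String) : Prop :=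
  ∀ line ∈ pdb_lines,
    (PySem.Str.startswith line "ATOM" || PySem.Str.startswith line "HETATM") = true →
    22 ≤ PySem.Str.len line
instance (pdb_lines : List String) : Decidable (Pre_build_residue_renumbering_map pdb_lines) := by
  unfold Pre_build_residue_renumbering_map; infer_instance

def pvWitness_build_residue_renumbering_map : List String :=
  ["ATOM      1  N   GLY A   1      11.104", "HETATM    2  O   HOH B  12          ", "REMARK short"]

def Spec_build_residue_renumbering_map (pdb_lines : List String) (out : List (String × String × String × Int)) : Prop := out = build_residue_renumbering_map_alt pdb_lines
instance (pdb_lines : List String) (out : List (String × String × String × Int)) : Decidable (Spec_build_residue_renumbering_map pdb_lines out) := by unfold Spec_build_residue_renumbering_map; infer_instance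

-- ===== CLAIM (what is proved, stated in full; the proofs are below) =====
def Claim_equal_build_residue_renumbering_map : Prop := ∀ (pdb_lines : List String), Dom_build_residue_renumbering_map pdb_lines → Pre_build_residue_renumbering_map pdb_lines → Spec_build_residue_renumbering_map pdb_lines (build_residue_renumbering_map pdb_lines)

-- ===== LEMMAS AND PROOFS =====

-- A re-insert of a key at its current value is a no-op.
theorem pv_insert_get_self {κ ν : Type} [BEq κ] [LawfulBEq κ] (d : PySem.Dict κ ν) (k : κ) (v : ν)
    (h : d.get? k = some v) (hn : d.keys.Nodup) : d.insert k v = d := by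
  apply PySem.Dict.ext
  have hc : d.contains k = true := by
    rw [PySem.Dict.contains_eq_isSome_get?, h]; rfl
  rw [PySem.Dict.items_insert_of_contains d v hc]
  have : ∀ p ∈ d.items, (if (p.1 == k) = true then (k, v) else p) = p := by
    intro p hp
    split_ifs with he
    · have hk : p.1 = k := by simpa using he
      have h2 : d.get? p.1 = some p.2 := PySem.Dict.get?_of_mem_items d (by simpa using hp) hn
      rw [hk, h] at h2
      simp at h2
      subst h2
      rw [← hk]
    · rfl
  rw [List.map_congr_left this]
  simp

-- Characterisation of A's step in terms of the shared helpers (definitional unfolding only).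
theorem pvStepA_char (seen res_map : PySem.Dict (String × String × String) Int) (n : Int) (line : String) :
    pvStepA (seen, res_map, n) line =
      if pvIsAtomB line then
        (if seen.contains (pvKeyB line) then
           (seen, res_map.insert (pvKeyB line) ((seen.get? (pvKeyB line)).getD 0), n)
         else
           (seen.insert (pvKeyB line) n, res_map.insert (pvKeyB line) n, n + 1))
      else (seen, res_map, n) := by
  simp only [pvStepA, pvIsAtomB, pvKeyB]
  split_ifs with h1 h2 <;> simp [PySem.Dict.get?_insert_self]

-- A's loop invariant: starting from twin dicts whose items enumerate ks,
-- A's fold keeps seen = res_map and its items enumerate the Set.add-fold of the keys.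
theorem pv_loopA (lines : List String) :
    ∀ (d : PySem.Dict (String × String × String) Int) (ks : List (String × String × String)),
    ks.Nodup →
    d.items = (PySem.List.enumerate ks 0).map (fun p => (p.2, p.1)) →
    (let ks' := lines.foldl (fun s line => if pvIsAtomB line then PySem.Set.add s (pvKeyB line) else s) ks
     (lines.foldl pvStepA (d, d, (ks.length : Int))).1 = (lines.foldl pvStepA (d, d, (ks.length : Int))).2.1 ∧
     (lines.foldl pvStepA (d, d, (ks.length : Int))).2.1.items = (PySem.List.enumerate ks' 0).map (fun p => (p.2, p.1)) ∧
     (lines.foldl pvStepA (d, d, (ks.length : Int))).2.2 = (ks'.length : Int)) := by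
  induction lines with
  | nil => intro d ks hnd hitems; exact ⟨rfl, hitems, rfl⟩
  | cons line rest ih =>
    intro d ks hnd hitems
    have hkeys : d.keys = ks := by
      show d.items.map (·.1) = ks
      rw [hitems, List.map_map]
      exact PySem.List.map_snd_enumerate ks 0
    have hnkeys : d.keys.Nodup := by rw [hkeys]; exact hnd
    simp only [List.foldl_cons, pvStepA_char]
    by_cases hc : pvIsAtomB line
    · by_cases hm : d.contains (pvKeyB line)
      · -- key already present: the step is a no-op; Set.add is a no-op too
        have hmem : pvKeyB line ∈ ks := by
          have := PySem.Dict.contains_eq_decide_mem_keys d (pvKeyB line)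
          rw [hm, hkeys] at this
          exact of_decide_eq_true this.symm
        obtain ⟨v, hv⟩ : ∃ v, d.get? (pvKeyB line) = some v := by
          have := PySem.Dict.contains_eq_isSome_get? (d := d) (k := pvKeyB line)
          rw [hm] at this
          exact Option.isSome_iff_exists.mp this.symm
        have hnoop : d.insert (pvKeyB line) ((d.get? (pvKeyB line)).getD 0) = d := by
          rw [hv]
          exact pv_insert_get_self d (pvKeyB line) v hv hnkeys
        have hadd : PySem.Set.add ks (pvKeyB line) = ks := by
          simp [PySem.Set.add, hmem]
        simp only [hc, if_true, hm, hnoop]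
        simpa [hc, hadd] using ih d ks hnd hitems
      · -- fresh key: both sides append it
        have hnotmem : pvKeyB line ∉ ks := by
          intro hmem
          have := PySem.Dict.contains_eq_decide_mem_keys d (pvKeyB line)
          rw [hkeys] at this
          simp [hmem] at this
          exact hm this
        have hadd : PySem.Set.add ks (pvKeyB line) = ks ++ [pvKeyB line] := by
          simp [PySem.Set.add, hnotmem]
        have hnd' : (ks ++ [pvKeyB line]).Nodup := by
          simp [List.nodup_append, hnd]
          intro a a1 b h1 h2
          exact hnotmem (h2 ▸ h1)
        have hitems' : (d.insert (pvKeyB line) (ks.length : Int)).items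
            = (PySem.List.enumerate (ks ++ [pvKeyB line]) 0).map (fun p => (p.2, p.1)) := by
          rw [PySem.Dict.items_insert_of_not_contains d _ (by simpa using hm)]
          rw [PySem.List.enumerate_append, List.map_append, ← hitems]
          simp [PySem.List.enumerate_cons, PySem.List.enumerate_nil]
        have := ih (d.insert (pvKeyB line) (ks.length : Int)) (ks ++ [pvKeyB line]) hnd' hitems'
        simp only [hc, if_true, hm]
        rw [hadd]
        simpa [List.length_append, Int.natCast_add] using this
    · -- non-ATOM line: the step is the identity
      simp only [hc]
      simpa [hc] using ih d ks hnd hitems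

-- The key-accumulating fold over lines is the Set.add fold over the filtered, mapped key list.
theorem pv_fold_filter_map (lines : List String) :
    ∀ (s : PySem.Set (String × String × String)),
    lines.foldl (fun s line => if pvIsAtomB line then PySem.Set.add s (pvKeyB line) else s) s
      = ((lines.filter pvIsAtomB).map pvKeyB).foldl PySem.Set.add s := by
  induction lines with
  | nil => intro s; rfl
  | cons line rest ih =>
    intro s
    by_cases hc : pvIsAtomB line <;> simp [hc, ih]

-- ---- B-side lemmas ----

-- first-occurrence position of key k in a list of (position, key) pairs (0 if absent)
def pvFfind (pairs : List (Int × (String × String × String))) (k : String × String × String) : Int :=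
  ((pairs.find? (fun q => q.2 == k)).map Prod.fst).getD 0

-- a guarded fold is the plain fold over the filtered list
theorem pv_foldl_if_filter {α β : Type} (c : β → Bool) (g : α → β → α) (l : List β) :
    ∀ (a : α), l.foldl (fun a x => if c x then g a x else a) a = (l.filter c).foldl g a := by
  induction l with
  | nil => intro a; rfl
  | cons x xs ih => intro a; by_cases hc : c x <;> simp [hc, ih]

-- lookup after a fold of inserts: the LAST write wins (searched via reverse-find?)
theorem pv_get_fold_insert (l : List (Int × (String × String × String))) :
    ∀ (d : PySem.Dict (String × String × String) Int) (k : String × String × String),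
    ((l.foldl (fun d q => d.insert q.2 q.1) d).get? k)
      = ((l.reverse.find? (fun q => q.2 == k)).map Prod.fst).or (d.get? k) := by
  induction l with
  | nil => intro d k; rfl
  | cons q rest ih =>
    intro d k
    simp only [List.foldl_cons, List.reverse_cons, List.find?_append, Option.map_or, Option.or_assoc]
    rw [ih]
    congr 1
    rw [PySem.Dict.get?_insert]
    by_cases hk : q.2 = k
    · simp [List.find?, hk]
    · have hb : (q.2 == k) = false := by simpa using hk
      simp [List.find?, hb]
      intro h
      exact absurd h.symm hk

-- so the backward fold from empty finds the FIRST occurrence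
theorem pv_get_fold_insert_rev (l : List (Int × (String × String × String))) (k : String × String × String) :
    ((l.reverse.foldl (fun d q => d.insert q.2 q.1) PySem.Dict.empty).get? k)
      = (l.find? (fun q => q.2 == k)).map Prod.fst := by
  rw [pv_get_fold_insert, List.reverse_reverse, PySem.Dict.get?_empty, Option.or_none]

-- first-occurrence positions are strictly increasing along the keep-first dedup of the keys
theorem pv_pairwise_ffind (pairs : List (Int × (String × String × String)))
    (hp : pairs.Pairwise (fun p q => p.1 < q.1)) :
    (PySem.Set.ofList (pairs.map Prod.snd)).Pairwise
      (fun a b => pvFfind pairs a < pvFfind pairs b) := by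
  induction pairs using List.reverseRecOn with
  | nil => simp [PySem.Set.ofList]
  | append_singleton L q ih =>
    obtain ⟨hpL, -, hlt⟩ := List.pairwise_append.mp hp
    have hlt' : ∀ p ∈ L, p.1 < q.1 := fun p hpmem => hlt p hpmem q (by simp)
    have ihL := ih hpL
    -- ffind is stable on keys already present in L
    have hstable : ∀ a ∈ PySem.Set.ofList (L.map Prod.snd), pvFfind (L ++ [q]) a = pvFfind L a := by
      intro a ha
      have ha' : a ∈ L.map Prod.snd := (PySem.Set.mem_ofList _ _).mp ha
      obtain ⟨p0, hp0mem, hp0⟩ := List.mem_map.mp ha'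
      have hsome : (L.find? (fun r => r.2 == a)).isSome = true :=
        List.find?_isSome.mpr ⟨p0, hp0mem, by simp [hp0]⟩
      obtain ⟨r0, hr0⟩ := Option.isSome_iff_exists.mp hsome
      simp [pvFfind, List.find?_append, hr0]
    -- present keys found in L have position < q.1
    have hbound : ∀ a ∈ PySem.Set.ofList (L.map Prod.snd), pvFfind L a < q.1 := by
      intro a ha
      have ha' : a ∈ L.map Prod.snd := (PySem.Set.mem_ofList _ _).mp ha
      obtain ⟨p0, hp0mem, hp0⟩ := List.mem_map.mp ha'
      have hsome : (L.find? (fun r => r.2 == a)).isSome = true :=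
        List.find?_isSome.mpr ⟨p0, hp0mem, by simp [hp0]⟩
      obtain ⟨r0, hr0⟩ := Option.isSome_iff_exists.mp hsome
      have : r0 ∈ L := List.mem_of_find?_eq_some hr0
      simpa [pvFfind, hr0] using hlt' r0 this
    have hofl : PySem.Set.ofList ((L ++ [q]).map Prod.snd)
        = PySem.Set.add (PySem.Set.ofList (L.map Prod.snd)) q.2 := by
      simp [PySem.Set.ofList]
    rw [hofl]
    by_cases hm : q.2 ∈ PySem.Set.ofList (L.map Prod.snd)
    · rw [show PySem.Set.add (PySem.Set.ofList (L.map Prod.snd)) q.2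
            = PySem.Set.ofList (L.map Prod.snd) by simp [PySem.Set.add, hm]]
      exact ihL.imp_of_mem (fun ha hb hr => by rw [hstable _ ha, hstable _ hb]; exact hr)
    · rw [show PySem.Set.add (PySem.Set.ofList (L.map Prod.snd)) q.2
            = PySem.Set.ofList (L.map Prod.snd) ++ [q.2] by simp [PySem.Set.add, hm]]
      refine List.pairwise_append.mpr ⟨?_, by simp, ?_⟩
      · exact ihL.imp_of_mem (fun ha hb hr => by rw [hstable _ ha, hstable _ hb]; exact hr)
      · intro a ha b hb
        rw [List.mem_singleton] at hb
        subst hb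
        have hnone : L.find? (fun r => r.2 == q.2) = none := by
          rw [List.find?_eq_none]
          intro x hx hxk
          exact hm ((PySem.Set.mem_ofList _ _).mpr (List.mem_map.mpr ⟨x, hx, by simpa using hxk⟩))
        have hfq : pvFfind (L ++ [q]) q.2 = q.1 := by
          simp [pvFfind, List.find?_append, hnone, List.find?]
        rw [hstable _ ha, hfq]
        exact hbound a ha

-- keys of kept (position, line) pairs, in order: filtering commutes with dropping the positions
theorem pv_map_snd_filter_enumerate (xs : List String) (s : Int) :
    ((PySem.List.enumerate xs s).filter (fun p => pvIsAtomB p.2)).map Prod.snd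
      = xs.filter pvIsAtomB := by
  induction xs generalizing s with
  | nil => rfl
  | cons x t ih =>
    rw [PySem.List.enumerate_cons]
    by_cases hc : pvIsAtomB x <;> simp [hc, ih]

-- ===== VERDICT (by name: the statement is the Claim_ definition above) =====
theorem build_residue_renumbering_map_spec : Claim_equal_build_residue_renumbering_map := by
  intro pdb_lines _ _
  unfold Spec_build_residue_renumbering_map
  -- abbreviations
  set E := PySem.List.enumerate pdb_lines 0 with hE
  set occ := E.filter (fun p => pvIsAtomB p.2) with hocc
  set pairs := occ.map (fun p => (p.1, pvKeyB p.2)) with hpairs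
  set ds := PySem.List.dedup ((pdb_lines.filter pvIsAtomB).map pvKeyB) with hds
  -- ================= A's side =================
  have hA := pv_loopA pdb_lines PySem.Dict.empty [] (by simp) (by rfl)
  simp only [List.length_nil, Nat.cast_zero] at hA
  obtain ⟨-, hitems, -⟩ := hA
  rw [pv_fold_filter_map] at hitems
  have hitems : (pdb_lines.foldl pvStepA (PySem.Dict.empty, PySem.Dict.empty, (0:Int))).2.1.items
      = (PySem.List.enumerate ds 0).map (fun p => (p.2, p.1)) := hitems
  -- ================= B's side =================
  -- B's dict is the insert-fold over pairs.reverse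
  have hfold : (PySem.List.pyRange (PySem.List.len pdb_lines - 1) (-1) (-1)).foldl
      (fun d pos =>
        let line := PySem.List.pyGetD pdb_lines pos ""
        if pvIsAtomB line then d.insert (pvKeyB line) pos else d)
      PySem.Dict.empty
      = pairs.reverse.foldl (fun d q => d.insert q.2 q.1) PySem.Dict.empty := by
    have hr : PySem.List.pyRange (PySem.List.len pdb_lines - 1) (-1) (-1)
        = (PySem.List.pyRange 0 (PySem.List.len pdb_lines) 1).reverse := by
      rw [PySem.List.pyRange_neg_one_eq_reverse]
      norm_num
    rw [hr]
    have hmapped : E.reverse.foldl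
        (fun d (p : Int × String) => if pvIsAtomB p.2 then d.insert (pvKeyB p.2) p.1 else d)
        PySem.Dict.empty
        = (PySem.List.pyRange 0 (PySem.List.len pdb_lines) 1).reverse.foldl
          (fun d pos =>
            let line := PySem.List.pyGetD pdb_lines pos ""
            if pvIsAtomB line then d.insert (pvKeyB line) pos else d)
          PySem.Dict.empty := by
      rw [hE, PySem.List.enumerate_eq_map_pyRange pdb_lines "", ← List.map_reverse, List.foldl_map]
    rw [← hmapped]
    refine Eq.trans (pv_foldl_if_filter (fun (p : Int × String) => pvIsAtomB p.2)
      (fun d (p : Int × String) => d.insert (pvKeyB p.2) p.1) E.reverse PySem.Dict.empty) ?_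
    rw [List.filter_reverse, ← hocc, hpairs, ← List.map_reverse, List.foldl_map]
  -- lookups in B's dict are first-occurrence positions
  have hget : ∀ k, (pairs.reverse.foldl (fun d q => d.insert q.2 q.1) PySem.Dict.empty).get? k
      = (pairs.find? (fun q => q.2 == k)).map Prod.fst := fun k => pv_get_fold_insert_rev pairs k
  -- B's keys
  have hkeysB : (pairs.reverse.foldl (fun d q => d.insert q.2 q.1) PySem.Dict.empty).keys
      = PySem.Set.update ([] : List (String × String × String)) (pairs.reverse.map Prod.snd) := by
    have := PySem.Dict.keys_foldl_insert_key (ν := Int) pairs.reverse Prod.snd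
      (fun _ q => q.1) PySem.Dict.empty
    simpa [PySem.Dict.keys_empty] using this
  -- the key multiset matches ds
  have hsnd : pairs.map Prod.snd = (pdb_lines.filter pvIsAtomB).map pvKeyB := by
    rw [hpairs, List.map_map]
    have : occ.map (fun p => pvKeyB p.2) = (occ.map Prod.snd).map pvKeyB := by
      rw [List.map_map]; rfl
    rw [show ((fun (q : Int × (String × String × String)) => q.2) ∘ fun p => (p.1, pvKeyB p.2))
          = fun (p : Int × String) => pvKeyB p.2 from rfl, this]
    congr 1
    rw [hocc, hE]
    exact pv_map_snd_filter_enumerate pdb_lines 0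
  have hperm : ds.Perm (pairs.reverse.foldl (fun d q => d.insert q.2 q.1) PySem.Dict.empty).keys := by
    rw [hkeysB]
    refine (List.perm_ext_iff_of_nodup ?_ ?_).mpr ?_
    · rw [hds, PySem.List.dedup_eq_ofList]; exact PySem.Set.nodup_ofList _
    · exact PySem.Set.nodup_update _ _ (by simp)
    · intro a
      rw [hds, PySem.List.dedup_eq_ofList, PySem.Set.mem_ofList, PySem.Set.mem_update,
        List.map_reverse, List.mem_reverse, ← hsnd]
      simp
  -- the sorted key list IS ds
  have hpwpairs : pairs.Pairwise (fun p q => p.1 < q.1) := by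
    rw [hpairs]
    rw [List.pairwise_map]
    exact List.Pairwise.sublist List.filter_sublist (PySem.List.pairwise_lt_enumerate pdb_lines 0)
  have hpw := pv_pairwise_ffind pairs hpwpairs
  rw [hsnd, ← PySem.List.dedup_eq_ofList, ← hds] at hpw
  have hsorted : PySem.List.sorted
      (pairs.reverse.foldl (fun d q => d.insert q.2 q.1) PySem.Dict.empty).keys
      (fun k => ((pairs.reverse.foldl (fun d q => d.insert q.2 q.1) PySem.Dict.empty).get? k).getD 0)
      false = ds := by
    refine PySem.List.sorted_eq_of_perm_of_pairwise_lt _ ds _ hperm ?_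
    refine hpw.imp_of_mem (fun {a b} _ _ hr => ?_)
    rw [hget a, hget b]
    exact hr
  -- ================= combine =================
  show (pdb_lines.foldl pvStepA (PySem.Dict.empty, PySem.Dict.empty, (0:Int))).2.1.items.map
        (fun p => (p.1.1, p.1.2.1, p.1.2.2, p.2))
      = build_residue_renumbering_map_alt pdb_lines
  rw [hitems, List.map_map]
  show _ = (PySem.List.enumerate (PySem.List.sorted
      ((PySem.List.pyRange (PySem.List.len pdb_lines - 1) (-1) (-1)).foldl
        (fun d pos =>
          let line := PySem.List.pyGetD pdb_lines pos ""
          if pvIsAtomB line then d.insert (pvKeyB line) pos else d)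
        PySem.Dict.empty).keys
      (fun k => (((PySem.List.pyRange (PySem.List.len pdb_lines - 1) (-1) (-1)).foldl
        (fun d pos =>
          let line := PySem.List.pyGetD pdb_lines pos ""
          if pvIsAtomB line then d.insert (pvKeyB line) pos else d)
        PySem.Dict.empty).get? k).getD 0)
      false) 0).map (fun p => (p.2.1, p.2.2.1, p.2.2.2, p.1))
  rw [hfold, hsorted]
  rfl
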